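-- pv_equiv track=rewrite | github.com/didicoBe/refacao_dialetica_esk | core/processing.py | filtra_arquivos
-- ===== SOURCE A (Python) =====
-- def filtra_arquivos(arquivos):
--     arquivo_capa = ""
--     arquivo_miolo = ""
--     for arquivo in arquivos:
--         if "_CAPA" in arquivo.upper():
--             arquivo_capa = arquivo
--         elif "_MIOLO" in arquivo.upper():
--             arquivo_miolo = arquivo
--     return arquivo_capa, arquivo_miolo
-- ===== SOURCE B (Python) =====
-- def filtra_arquivos(arquivos):
--     files = list(arquivos)
--     capas = [f for f in files if "_CAPA" in f.upper()]
--     miolos = [f for f in files if "_MIOLO" in f.upper() and "_CAPA" not in f.upper()]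
--     return (capas[-1] if capas else "", miolos[-1] if miolos else "")
-- ===== Notes on version B (the rewrite author's own statement) =====
-- stated objective: simpler
-- what changed: Replaces the interleaved overwrite loop over two mutable slots with two declarative filtered lists (capa files, and miolo-but-not-capa files to honour the elif) followed by a take-last on each.
import Mathlib
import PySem

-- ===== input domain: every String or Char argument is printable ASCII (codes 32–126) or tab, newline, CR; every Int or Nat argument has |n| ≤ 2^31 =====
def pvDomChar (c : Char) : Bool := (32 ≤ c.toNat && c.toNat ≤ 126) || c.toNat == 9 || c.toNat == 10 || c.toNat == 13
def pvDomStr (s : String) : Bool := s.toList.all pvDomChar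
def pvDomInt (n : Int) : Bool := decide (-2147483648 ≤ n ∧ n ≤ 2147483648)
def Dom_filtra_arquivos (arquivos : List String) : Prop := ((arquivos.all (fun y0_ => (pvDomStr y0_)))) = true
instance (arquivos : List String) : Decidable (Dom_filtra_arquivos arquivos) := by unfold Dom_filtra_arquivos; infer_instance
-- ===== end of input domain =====

-- B replaces A's interleaved overwrite loop with two filtered lists plus take-last (objective: simpler).

-- ===== PORT A =====
-- "_CAPA" in arquivo.upper()
def isCapa (arquivo : String) : Bool := PySem.Str.isIn "_CAPA" (PySem.Str.upper arquivo)
-- "_MIOLO" in arquivo.upper()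
def isMiolo (arquivo : String) : Bool := PySem.Str.isIn "_MIOLO" (PySem.Str.upper arquivo)
-- one loop iteration of A: overwrite the matching slot (elif: miolo only when not capa)
def stepA (st : String × String) (arquivo : String) : String × String :=
  if isCapa arquivo then (arquivo, st.2)
  else if isMiolo arquivo then (st.1, arquivo)
  else st

def filtra_arquivos (arquivos : List String) : String × String :=
  arquivos.foldl stepA ("", "")

-- ===== PORT B =====
def filtra_arquivos_alt (arquivos : List String) : String × String :=
  let files := arquivos
  let capas := files.filter (fun f => isCapa f)
  let miolos := files.filter (fun f => isMiolo f && !isCapa f)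
  ((capas.getLast?).getD "", (miolos.getLast?).getD "")

-- ===== PRECONDITION & SPEC =====
def Spec_filtra_arquivos (arquivos : List String) (out : String × String) : Prop := out = filtra_arquivos_alt arquivos
instance (arquivos : List String) (out : String × String) : Decidable (Spec_filtra_arquivos arquivos out) := by unfold Spec_filtra_arquivos; infer_instance

-- ===== CLAIM (what is proved, stated in full; the proofs are below) =====
def Claim_equal_filtra_arquivos : Prop := ∀ (arquivos : List String), Dom_filtra_arquivos arquivos → Spec_filtra_arquivos arquivos (filtra_arquivos arquivos)

-- ===== LEMMAS AND PROOFS =====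

-- loop invariant: from any state (c, m), A's fold ends at the last capa (default c)
-- and the last miolo-not-capa (default m)
theorem filtra_foldl_eq (xs : List String) (c m : String) :
    xs.foldl stepA (c, m)
    = ((xs.filter (fun f => isCapa f)).getLast?.getD c,
       (xs.filter (fun f => isMiolo f && !isCapa f)).getLast?.getD m) := by
  induction xs generalizing c m with
  | nil => rfl
  | cons x xs ih =>
    rw [List.foldl_cons, List.filter_cons, List.filter_cons]
    by_cases hc : isCapa x
    · simp only [stepA, hc, Bool.not_true, Bool.and_false, if_true, Bool.false_eq_true,
        if_false, ih, List.getLast?_cons, Option.getD_some]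
    · rw [Bool.not_eq_true] at hc
      by_cases hm : isMiolo x
      · simp only [stepA, hc, hm, Bool.not_false, Bool.and_true, Bool.false_eq_true,
          if_false, if_true, ih, List.getLast?_cons, Option.getD_some]
      · rw [Bool.not_eq_true] at hm
        simp only [stepA, hc, hm, Bool.false_and, Bool.false_eq_true, if_false, ih]

-- ===== VERDICT (by name: the statement is the Claim_ definition above) =====
theorem filtra_arquivos_spec : Claim_equal_filtra_arquivos := by
  intro arquivos _
  unfold Spec_filtra_arquivos filtra_arquivos filtra_arquivos_alt
  exact filtra_foldl_eq arquivos "" ""
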